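-- pv_equiv track=rewrite | github.com/Maxlm4/ArtificialIntelligenceProject | lotrET4.py | oftenTogetherForOne
-- ===== SOURCE A (Python) =====
-- def convToMin(s):
--     convertToMin = dict([
--     ("A","a"),
--     ("B","b"),
--     ("C","c"),
--     ("D","d"),
--     ("E","e"),
--     ("F","f"),
--     ("G","g"),
--     ("H","h"),
--     ("I","i"),
--     ("J","j"),
--     ("K","k"),
--     ("L","l"),
--     ("M","m"),
--     ("N","n"),
--     ("O","o"),
--     ("P","p"),
--     ("Q","q"),
--     ("R","r"),
--     ("S","s"),
--     ("T","t"),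
--     ("U","u"),
--     ("V","v"),
--     ("W","w"),
--     ("X","x"),
--     ("Y","y"),
--     ("Z","z"),
--     ("Ë","ë"),
--     ("Ä","ä"),
--     ("Ö","ö"),
--     ("Â","â"),
--     ("Ê","ê"),
--     ("Î","î"),
--     ("Ô","ô"),
--     ("Á","á"),
--     ("É","é"),
--     ("Í","í"),
--     ("Ó","ó"),
--     ("Ú","ú")
--     ])
--     s2 = ""
--     for i in range(len(s)):
--         if s[i] in convertToMin:
--             s2 += convertToMin[s[i]]
--         else:
--             s2 += s[i]
--     return s2
--
-- def oftenTogetherForOne(string_to_iterate, data):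
--     firstLetter = dict([])
--     for letter in string_to_iterate:
--         lettersProbs = dict([])
--         for letter2 in string_to_iterate:
--             lettersProbs[letter2]= 0
--         firstLetter[letter] = lettersProbs
--
--     treated = ""
--     for i in range(len(data)):
--         if convToMin(data)[i] not in treated:
--             post_treated = ""
--             for j in range(i+1,len(data)):
--                 firstLetter[convToMin(data)[j]][convToMin(data)[i]]+=1
--                 if convToMin(data)[i] != convToMin(data)[j]:
--                     firstLetter[convToMin(data)[i]][convToMin(data)[j]]+=1
--                 post_treated+=convToMin(data)[j]
--         treated+=convToMin(data)[i]
--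
--     return firstLetter
-- ===== SOURCE B (Python) =====
-- # B: closed-form per-cell computation — each cell is read off directly from counts in the
-- # suffix after the first occurrence, instead of A's nested index loops that re-lowercase
-- # the whole data string at every step.
--
-- def convToMin(s):
--     table = dict([
--         ("A", "a"), ("B", "b"), ("C", "c"), ("D", "d"), ("E", "e"), ("F", "f"),
--         ("G", "g"), ("H", "h"), ("I", "i"), ("J", "j"), ("K", "k"), ("L", "l"),
--         ("M", "m"), ("N", "n"), ("O", "o"), ("P", "p"), ("Q", "q"), ("R", "r"),
--         ("S", "s"), ("T", "t"), ("U", "u"), ("V", "v"), ("W", "w"), ("X", "x"),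
--         ("Y", "y"), ("Z", "z"),
--         ("Ë", "ë"), ("Ä", "ä"), ("Ö", "ö"), ("Â", "â"), ("Ê", "ê"), ("Î", "î"),
--         ("Ô", "ô"), ("Á", "á"), ("É", "é"), ("Í", "í"), ("Ó", "ó"), ("Ú", "ú"),
--     ])
--     return "".join(table.get(ch, ch) for ch in s)
--
-- def oftenTogetherForOne(string_to_iterate, data):
--     keys = list(dict.fromkeys(string_to_iterate))
--     d = convToMin(data)
--
--     def after_first(ch):
--         # suffix of d strictly after the first occurrence of ch ('' if absent)
--         return d.partition(ch)[2]
--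
--     def cell(x, y):
--         if x == y:
--             return after_first(x).count(x)
--         return after_first(y).count(x) + after_first(x).count(y)
--
--     return {x: {y: cell(x, y) for y in keys} for x in keys}
-- ===== Notes on version B (the rewrite author's own statement) =====
-- stated objective: faster
-- what changed: A's nested index loops (which recompute convToMin(data) at every single element access and rescan the suffix for each first occurrence) are replaced by a closed form: lowercase once, then fill each cell (x,y) directly from occurrence counts in the suffix after the first occurrence of x resp. y.
import Mathlib
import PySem

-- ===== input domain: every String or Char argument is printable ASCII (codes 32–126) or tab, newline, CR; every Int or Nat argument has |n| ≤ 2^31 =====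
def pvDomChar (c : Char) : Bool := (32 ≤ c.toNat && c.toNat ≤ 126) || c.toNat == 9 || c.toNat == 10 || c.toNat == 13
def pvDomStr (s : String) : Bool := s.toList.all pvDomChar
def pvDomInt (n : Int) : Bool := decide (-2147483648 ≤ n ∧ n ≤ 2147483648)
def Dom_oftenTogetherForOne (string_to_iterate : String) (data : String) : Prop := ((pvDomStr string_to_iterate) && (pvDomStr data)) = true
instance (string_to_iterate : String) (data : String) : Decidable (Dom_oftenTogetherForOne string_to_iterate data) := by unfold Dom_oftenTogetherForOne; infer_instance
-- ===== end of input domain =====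

-- B replaces A's nested index loops (which re-lowercase the whole data string at every
-- access) by a per-cell closed form read off from suffix counts after first occurrences — faster.

-- ===== PORT A =====

-- the constant convertToMin dict of the Python module, as a lookup function (membership test + lookup, default the char itself)
def convChar (c : Char) : Char :=
  if c = 'A' then 'a' else if c = 'B' then 'b' else if c = 'C' then 'c'
  else if c = 'D' then 'd' else if c = 'E' then 'e' else if c = 'F' then 'f'
  else if c = 'G' then 'g' else if c = 'H' then 'h' else if c = 'I' then 'i'
  else if c = 'J' then 'j' else if c = 'K' then 'k' else if c = 'L' then 'l'
  else if c = 'M' then 'm' else if c = 'N' then 'n' else if c = 'O' then 'o'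
  else if c = 'P' then 'p' else if c = 'Q' then 'q' else if c = 'R' then 'r'
  else if c = 'S' then 's' else if c = 'T' then 't' else if c = 'U' then 'u'
  else if c = 'V' then 'v' else if c = 'W' then 'w' else if c = 'X' then 'x'
  else if c = 'Y' then 'y' else if c = 'Z' then 'z'
  else if c = 'Ë' then 'ë' else if c = 'Ä' then 'ä' else if c = 'Ö' then 'ö'
  else if c = 'Â' then 'â' else if c = 'Ê' then 'ê' else if c = 'Î' then 'î'
  else if c = 'Ô' then 'ô' else if c = 'Á' then 'á' else if c = 'É' then 'é'
  else if c = 'Í' then 'í' else if c = 'Ó' then 'ó' else if c = 'Ú' then 'ú'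
  else c

-- A's convToMin: s2 built by += over the characters
def convToMin (s : String) : String :=
  String.ofList (s.toList.foldl (fun s2 c => s2 ++ [convChar c]) [])

-- convToMin(data)[i] (always indexed in range by A; total form under that condition)
def dchr (data : String) (i : Int) : Char :=
  PySem.List.pyGetD (convToMin data).toList i ' '

-- body of the inner j-loop, on the two 1-char strings convToMin(data)[i], convToMin(data)[j]
def innerBodyA (ci cj : Char)
    (st : PySem.Dict String (PySem.Dict String Int) × List Char) :
    PySem.Dict String (PySem.Dict String Int) × List Char :=
  let fl1 := st.1.modify (String.ofList [cj]) PySem.Dict.empty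
      (fun d => d.modify (String.ofList [ci]) 0 (· + 1))
  let fl2 := if ci ≠ cj then
      fl1.modify (String.ofList [ci]) PySem.Dict.empty
        (fun d => d.modify (String.ofList [cj]) 0 (· + 1))
    else fl1
  (fl2, st.2 ++ [cj])

def innerStepA (data : String) (i : Int)
    (st : PySem.Dict String (PySem.Dict String Int) × List Char) (j : Int) :
    PySem.Dict String (PySem.Dict String Int) × List Char :=
  innerBodyA (dchr data i) (dchr data j) st

-- body of the outer i-loop; second component is 'treated'
def outerStepA (data : String)
    (st : PySem.Dict String (PySem.Dict String Int) × List Char) (i : Int) :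
    PySem.Dict String (PySem.Dict String Int) × List Char :=
  if dchr data i ∈ st.2 then (st.1, st.2 ++ [dchr data i])
  else
    let inner := (PySem.List.pyRange (i + 1) (PySem.Str.len data)).foldl
        (innerStepA data i) (st.1, [])
    (inner.1, st.2 ++ [dchr data i])

def oftenTogetherForOne (string_to_iterate : String) (data : String) :
    List (String × List (String × Int)) :=
  let firstLetter : PySem.Dict String (PySem.Dict String Int) :=
    string_to_iterate.toList.foldl (fun fl letter =>
      let lettersProbs : PySem.Dict String Int :=
        string_to_iterate.toList.foldl
          (fun lp letter2 => lp.insert (String.ofList [letter2]) (0 : Int))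
          PySem.Dict.empty
      fl.insert (String.ofList [letter]) lettersProbs) PySem.Dict.empty
  let final := (PySem.List.pyRange 0 (PySem.Str.len data)).foldl
      (outerStepA data) (firstLetter, [])
  final.1.items.map (fun p => (p.1, p.2.items))

-- ===== PORT B =====

-- hand port of d.partition(ch)[2]: the suffix strictly after the first occurrence of ch, '' if absent (exact)
def afterFirstB (d : List Char) (ch : Char) : List Char :=
  (d.dropWhile (fun c => c ≠ ch)).tail

def cellB (d : List Char) (x y : Char) : Int :=
  if x = y then (PySem.List.count (afterFirstB d x) x : Int)
  else (PySem.List.count (afterFirstB d y) x : Int)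
       + (PySem.List.count (afterFirstB d x) y : Int)

def oftenTogetherForOne_alt (string_to_iterate : String) (data : String) :
    List (String × List (String × Int)) :=
  let keys := PySem.List.dedup string_to_iterate.toList
  let d := data.toList.map convChar   -- B's convToMin: ''.join(table.get(ch, ch) for ch in s)
  keys.map (fun x =>
    (String.ofList [x], keys.map (fun y => (String.ofList [y], cellB d x y))))

-- ===== PRECONDITION & SPEC =====

-- the per-character action of A's convToMin table, written in closed form for the
-- precondition statement: A-Z lowered by +32, plus exactly the accented pairs of the table
def preLower (c : Char) : Char :=
  if 'A' ≤ c ∧ c ≤ 'Z' then Char.ofNat (c.toNat + 32)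
  else if c = 'Ë' then 'ë' else if c = 'Ä' then 'ä' else if c = 'Ö' then 'ö'
  else if c = 'Â' then 'â' else if c = 'Ê' then 'ê' else if c = 'Î' then 'î'
  else if c = 'Ô' then 'ô' else if c = 'Á' then 'á' else if c = 'É' then 'é'
  else if c = 'Í' then 'í' else if c = 'Ó' then 'ó' else if c = 'Ú' then 'ú'
  else c

-- Pre_ excludes exactly the inputs where Python A raises KeyError: len(data) >= 2 and some
-- letter of the lowercased data is absent from string_to_iterate's letters, the only keys
-- of firstLetter (with len(data) <= 1 the inner loop never runs, so no dict access occurs).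
def Pre_oftenTogetherForOne (string_to_iterate : String) (data : String) : Prop :=
  data.toList.length ≤ 1 ∨
    (data.toList.all (fun c => string_to_iterate.toList.contains (preLower c))) = true

instance (string_to_iterate : String) (data : String) :
    Decidable (Pre_oftenTogetherForOne string_to_iterate data) := by
  unfold Pre_oftenTogetherForOne; infer_instance

def pvWitness_oftenTogetherForOne : String × String := ("abc", "aCbba")

def Spec_oftenTogetherForOne (string_to_iterate : String) (data : String)
    (out : List (String × List (String × Int))) : Prop :=
  out = oftenTogetherForOne_alt string_to_iterate data

instance (string_to_iterate : String) (data : String)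
    (out : List (String × List (String × Int))) :
    Decidable (Spec_oftenTogetherForOne string_to_iterate data out) := by
  unfold Spec_oftenTogetherForOne; infer_instance

-- ===== CLAIM (what is proved, stated in full; the proofs are below) =====
def Claim_equal_oftenTogetherForOne : Prop :=
  ∀ (string_to_iterate : String) (data : String),
    Dom_oftenTogetherForOne string_to_iterate data →
    Pre_oftenTogetherForOne string_to_iterate data →
    Spec_oftenTogetherForOne string_to_iterate data
      (oftenTogetherForOne string_to_iterate data)

-- ===== LEMMAS AND PROOFS =====

-- abbreviation for the 1-char-string keys
def sk (c : Char) : String := String.ofList [c]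

-- the canonical nested table over a key list S with entries f x y
def mkRow (S : List Char) (g : Char → Int) : PySem.Dict String Int :=
  PySem.Dict.mk (S.map (fun y => (sk y, g y)))

def mkT (S : List Char) (f : Char → Char → Int) :
    PySem.Dict String (PySem.Dict String Int) :=
  PySem.Dict.mk (S.map (fun x => (sk x, mkRow S (f x))))

-- one '+= 1' on cell (a, b)
def bumpT (T : PySem.Dict String (PySem.Dict String Int)) (a b : Char) :
    PySem.Dict String (PySem.Dict String Int) :=
  T.modify (sk a) PySem.Dict.empty (fun d => d.modify (sk b) 0 (· + 1))

-- contribution of A's inner loop at first-occurrence letter c with remaining letters r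
def innerCnt (c : Char) (r : List Char) (x y : Char) : Int :=
  (if y = c then (r.count x : Int) else 0) +
  (if x = c ∧ ¬ y = c then (r.count y : Int) else 0)

-- total contribution of A's main loop on remaining letters r, given already-treated letters 'seen'
def TOT (seen : List Char) : List Char → Char → Char → Int
  | [] => fun _ _ => 0
  | c :: r => fun x y =>
      (if c ∈ seen then 0 else innerCnt c r x y) + TOT (seen ++ [c]) r x y

theorem ofList_singleton_eq_sk (c : Char) : String.ofList [c] = sk c := rfl

theorem sk_inj {a b : Char} (h : sk a = sk b) : a = b := by
  have := congrArg String.toList h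
  simpa [sk] using this

theorem sk_inj_iff (a b : Char) : sk a = sk b ↔ a = b :=
  ⟨sk_inj, fun h => h ▸ rfl⟩

theorem conv_toList (s : String) :
    (convToMin s).toList = s.toList.map convChar := by
  unfold convToMin
  rw [PySem.List.foldl_append_singleton_eq_map]
  simp

theorem convChar_eq_preLower (c : Char) (h : pvDomChar c = true) :
    convChar c = preLower c := by
  have hc : c.toNat < 127 := by
    simp only [pvDomChar, Bool.or_eq_true, Bool.and_eq_true, decide_eq_true_eq,
      beq_iff_eq] at h
    omega
  have key : ∀ n : Fin 127, convChar (Char.ofNat n.val) = preLower (Char.ofNat n.val) := by decide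
  have := key ⟨c.toNat, hc⟩
  simpa [Char.ofNat_toNat] using this

-- lookups in a canonical row
theorem get?_mk_map {ν : Type} (S : List Char) (g : Char → ν) (q : String) :
    (PySem.Dict.mk (S.map fun y => (sk y, g y))).get? q
      = (S.find? (fun y => sk y == q)).map g := by
  induction S with
  | nil => rfl
  | cons c S ih =>
      simp only [List.map_cons, PySem.Dict.get?_mk_cons, List.find?_cons]
      by_cases h : sk c == q
      · simp [h]
      · simp only [h, Bool.false_eq_true, if_false]
        simpa using ih

theorem find?_sk_self (S : List Char) (x : Char) :
    S.find? (fun y => sk y == sk x) = if x ∈ S then some x else none := by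
  induction S with
  | nil => simp
  | cons c S ih =>
      by_cases h : c = x
      · subst h; simp
      · have : (sk c == sk x) = false := by
          simpa [beq_iff_eq, sk_inj_iff] using h
        have h' : ¬ (x = c) := fun e => h e.symm
        simp [this, ih, List.mem_cons, h']

theorem getD_mk_map {ν : Type} (S : List Char) (g : Char → ν) (x : Char) (d0 : ν) :
    (PySem.Dict.mk (S.map fun y => (sk y, g y))).getD (sk x) d0
      = if x ∈ S then g x else d0 := by
  rw [PySem.Dict.getD_eq_get?_getD, get?_mk_map, find?_sk_self]
  by_cases h : x ∈ S <;> simp [h]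

theorem getD_mkRow (S : List Char) (g : Char → Int) (x : Char) (d0 : Int) :
    (mkRow S g).getD (sk x) d0 = if x ∈ S then g x else d0 :=
  getD_mk_map S g x d0

theorem getD_mkT (S : List Char) (f : Char → Char → Int) (x : Char)
    (d0 : PySem.Dict String Int) :
    (mkT S f).getD (sk x) d0 = if x ∈ S then mkRow S (f x) else d0 :=
  getD_mk_map S _ x d0

theorem keys_mkT (S : List Char) (f : Char → Char → Int) :
    (mkT S f).keys = S.map sk := by
  simp [mkT, PySem.Dict.keys_mk, List.map_map, Function.comp]

theorem keys_mkRow (S : List Char) (g : Char → Int) :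
    (mkRow S g).keys = S.map sk := by
  simp [mkRow, PySem.Dict.keys_mk, List.map_map, Function.comp]

theorem nodup_map_sk {S : List Char} (h : S.Nodup) : (S.map sk).Nodup :=
  h.map (fun _ _ hab => sk_inj hab)

theorem dict_eq_of_keys_getD {ν : Type} (d d' : PySem.Dict String ν) (dflt : ν)
    (h1 : d.keys.Nodup) (h2 : d.keys = d'.keys)
    (h3 : ∀ k ∈ d.keys, d.getD k dflt = d'.getD k dflt) : d = d' := by
  apply PySem.Dict.ext
  rw [PySem.Dict.items_eq_map_keys d h1 dflt,
      PySem.Dict.items_eq_map_keys d' (h2 ▸ h1) dflt, ← h2]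
  exact List.map_congr_left (fun k hk => by rw [h3 k hk])

theorem mkRow_congr {S : List Char} {g g' : Char → Int}
    (h : ∀ y ∈ S, g y = g' y) : mkRow S g = mkRow S g' := by
  unfold mkRow
  exact congrArg _ (List.map_congr_left (fun y hy => by rw [h y hy]))

theorem mkT_congr {S : List Char} {f f' : Char → Char → Int}
    (h : ∀ x ∈ S, ∀ y ∈ S, f x y = f' x y) : mkT S f = mkT S f' := by
  unfold mkT
  exact congrArg _ (List.map_congr_left (fun x hx => by
    rw [mkRow_congr (fun y hy => h x hx y hy)]))

theorem modify_mkRow (S : List Char) (g : Char → Int) (b : Char)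
    (hb : b ∈ S) (hnd : S.Nodup) :
    (mkRow S g).modify (sk b) 0 (· + 1)
      = mkRow S (fun y => if y = b then g y + 1 else g y) := by
  have hcont : (mkRow S g).contains (sk b) = true := by
    rw [PySem.Dict.contains_eq_decide_mem_keys, keys_mkRow]
    simp only [decide_eq_true_eq]
    exact List.mem_map_of_mem hb
  have hkeys : ((mkRow S g).modify (sk b) 0 (· + 1)).keys = S.map sk := by
    rw [PySem.Dict.keys_modify, PySem.Dict.keys_insert_of_contains _ _ hcont, keys_mkRow]
  apply dict_eq_of_keys_getD _ _ (0 : Int)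
  · rw [hkeys]; exact nodup_map_sk hnd
  · rw [hkeys, keys_mkRow]
  · intro k hk
    rw [hkeys] at hk
    obtain ⟨x, hx, rfl⟩ := List.mem_map.mp hk
    rw [PySem.Dict.getD_modify, getD_mkRow, getD_mkRow, getD_mkRow]
    by_cases hxb : x = b
    · subst hxb; simp [hx]
    · have : ¬ (sk x = sk b) := fun e => hxb (sk_inj e)
      simp [this, hxb, hx]

theorem bumpT_mkT (S : List Char) (f : Char → Char → Int) (a b : Char)
    (ha : a ∈ S) (hb : b ∈ S) (hnd : S.Nodup) :
    bumpT (mkT S f) a b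
      = mkT S (fun x y => if x = a ∧ y = b then f x y + 1 else f x y) := by
  have hcont : (mkT S f).contains (sk a) = true := by
    rw [PySem.Dict.contains_eq_decide_mem_keys, keys_mkT]
    simp only [decide_eq_true_eq]
    exact List.mem_map_of_mem ha
  have hkeys : (bumpT (mkT S f) a b).keys = S.map sk := by
    unfold bumpT
    rw [PySem.Dict.keys_modify, PySem.Dict.keys_insert_of_contains _ _ hcont, keys_mkT]
  apply dict_eq_of_keys_getD _ _ PySem.Dict.empty
  · rw [hkeys]; exact nodup_map_sk hnd
  · rw [hkeys, keys_mkT]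
  · intro k hk
    rw [hkeys] at hk
    obtain ⟨x, hx, rfl⟩ := List.mem_map.mp hk
    unfold bumpT
    rw [PySem.Dict.getD_modify]
    simp only [getD_mkT, if_pos hx, if_pos ha]
    by_cases hxa : x = a
    · subst hxa
      rw [if_pos rfl, modify_mkRow S _ b hb hnd]
      exact mkRow_congr (fun y _ => by by_cases hyb : y = b <;> simp [hyb])
    · rw [if_neg (fun e => hxa (sk_inj e))]
      exact mkRow_congr (fun y _ => by simp [hxa])

theorem foldl_insert_const {ν : Type} (l : List Char) (v : ν) :
    ∀ (S : List Char), S.Nodup →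
      l.foldl (fun d c => d.insert (sk c) v)
          (PySem.Dict.mk (S.map fun c => (sk c, v)))
        = PySem.Dict.mk ((PySem.Set.update S l).map fun c => (sk c, v)) := by
  induction l with
  | nil => intro S _; simp [PySem.Set.update]
  | cons c l ih =>
      intro S hnd
      rw [List.foldl_cons, PySem.Set.update_cons]
      have hstep : (PySem.Dict.mk (S.map fun c' => (sk c', v))).insert (sk c) v
          = PySem.Dict.mk ((PySem.Set.add S c).map fun c' => (sk c', v)) := by
        by_cases hm : c ∈ S
        · have hcont : (PySem.Dict.mk (S.map fun c' => (sk c', v))).contains (sk c) = true := by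
            rw [PySem.Dict.contains_eq_decide_mem_keys, PySem.Dict.keys_mk]
            simp only [decide_eq_true_eq, List.map_map]
            exact List.mem_map_of_mem hm
          apply PySem.Dict.ext
          rw [PySem.Dict.items_insert_of_contains _ _ hcont, PySem.Set.add_of_mem hm]
          show (S.map fun c' => (sk c', v)).map _ = S.map fun c' => (sk c', v)
          rw [List.map_map]
          apply List.map_congr_left
          intro y _
          by_cases hyc : y = c
          · subst hyc; simp
          · have hbf : (sk y == sk c) = false := by
              simpa [beq_iff_eq, sk_inj_iff] using hyc
            show (if (sk y == sk c) = true then (sk c, v) else (sk y, v)) = (sk y, v)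
            rw [hbf]
            simp
        · have hcont : (PySem.Dict.mk (S.map fun c' => (sk c', v))).contains (sk c) = false := by
            rw [PySem.Dict.contains_eq_decide_mem_keys, PySem.Dict.keys_mk]
            simp only [decide_eq_false_iff_not, List.map_map]
            intro hmem
            obtain ⟨y, hy, hey⟩ := List.mem_map.mp hmem
            exact hm ((sk_inj (by simpa using hey)) ▸ hy)
          apply PySem.Dict.ext
          rw [PySem.Dict.items_insert_of_not_contains _ _ hcont, PySem.Set.add_of_not_mem hm]
          simp
      rw [hstep, ih (PySem.Set.add S c) (PySem.Set.nodup_add S c hnd)]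

theorem init_eq (sit : String) :
    (sit.toList.foldl (fun fl letter =>
      let lettersProbs : PySem.Dict String Int :=
        sit.toList.foldl
          (fun lp letter2 => lp.insert (String.ofList [letter2]) (0 : Int))
          PySem.Dict.empty
      fl.insert (String.ofList [letter]) lettersProbs) PySem.Dict.empty)
    = mkT (PySem.List.dedup sit.toList) (fun _ _ => 0) := by
  have hinner : sit.toList.foldl
      (fun lp letter2 => lp.insert (String.ofList [letter2]) (0 : Int)) PySem.Dict.empty
      = mkRow (PySem.List.dedup sit.toList) (fun _ => 0) := by
    have := foldl_insert_const sit.toList (0 : Int) [] List.nodup_nil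
    simpa [PySem.Set.update_nil_left, PySem.List.dedup_eq_ofList, mkRow, sk] using this
  show sit.toList.foldl (fun fl letter => fl.insert (String.ofList [letter])
      (sit.toList.foldl (fun lp letter2 => lp.insert (String.ofList [letter2]) (0 : Int))
        PySem.Dict.empty)) PySem.Dict.empty = _
  rw [hinner]
  have := foldl_insert_const sit.toList (mkRow (PySem.List.dedup sit.toList) (fun _ => 0))
      [] List.nodup_nil
  simpa [PySem.Set.update_nil_left, PySem.List.dedup_eq_ofList, mkT, sk] using this

theorem innerList (ci : Char) (r : List Char) (S : List Char)
    (f : Char → Char → Int) (post : List Char)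
    (hc : r ≠ [] → ci ∈ S) (hr : ∀ z ∈ r, z ∈ S) (hnd : S.Nodup) :
    r.foldl (fun st cj => innerBodyA ci cj st) (mkT S f, post)
      = (mkT S (fun x y => f x y + innerCnt ci r x y), post ++ r) := by
  induction r generalizing f post with
  | nil =>
      simp only [List.foldl_nil, List.append_nil]
      refine Prod.ext ?_ rfl
      exact (mkT_congr (fun x _ y _ => by simp [innerCnt])).symm
  | cons cj r ih =>
      have hci : ci ∈ S := hc (by simp)
      have hcj : cj ∈ S := hr cj (by simp)
      rw [List.foldl_cons]
      have hbody : innerBodyA ci cj (mkT S f, post)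
          = (mkT S (fun x y =>
              if ci = cj then (if x = cj ∧ y = ci then f x y + 1 else f x y)
              else (if x = ci ∧ y = cj then (if x = cj ∧ y = ci then f x y + 1 else f x y) + 1
                    else (if x = cj ∧ y = ci then f x y + 1 else f x y))),
             post ++ [cj]) := by
        unfold innerBodyA
        simp only [ofList_singleton_eq_sk]
        by_cases hcc : ci = cj
        · subst hcc
          rw [if_neg (by simp)]
          have h1 := bumpT_mkT S f ci ci hci hci hnd
          unfold bumpT at h1
          rw [h1]
          refine Prod.ext ?_ rfl
          exact mkT_congr (fun x _ y _ => by simp)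
        · rw [if_pos hcc]
          have h1 := bumpT_mkT S f cj ci hcj hci hnd
          have h2 := bumpT_mkT S (fun x y => if x = cj ∧ y = ci then f x y + 1 else f x y)
              ci cj hci hcj hnd
          unfold bumpT at h1 h2
          rw [h1, h2]
          refine Prod.ext ?_ rfl
          exact mkT_congr (fun x _ y _ => by simp [hcc])
      rw [hbody, ih _ (post ++ [cj]) (fun _ => hci)
            (fun z hz => hr z (List.mem_cons_of_mem _ hz))]
      refine Prod.ext ?_ (by simp)
      apply mkT_congr
      intro x _ y _
      simp only [innerCnt, List.count_cons]
      by_cases hcc : ci = cj <;> by_cases hx : x = ci <;> by_cases hy : y = ci <;>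
        by_cases hx2 : x = cj <;> by_cases hy2 : y = cj <;>
        simp_all <;> push_cast <;> first | ring | (exact Ne.symm (by assumption))

theorem afterFirstB_cons (c : Char) (r : List Char) (z : Char) :
    afterFirstB (c :: r) z = if z = c then r else afterFirstB r z := by
  by_cases h : z = c <;> simp [afterFirstB, h, Ne.symm]

theorem TOT_closed (r : List Char) :
    ∀ (seen : List Char) (x y : Char),
      TOT seen r x y =
        (if x = y then
          (if x ∈ seen then 0 else ((afterFirstB r x).count x : Int))
         else
          (if y ∈ seen then 0 else ((afterFirstB r y).count x : Int)) +
          (if x ∈ seen then 0 else ((afterFirstB r x).count y : Int))) := by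
  induction r with
  | nil =>
      intro seen x y
      simp [TOT, afterFirstB]
  | cons c r ih =>
      intro seen x y
      simp only [TOT, ih (seen ++ [c]), afterFirstB_cons, innerCnt, List.mem_append,
        List.mem_singleton]
      by_cases hxy : x = y <;> by_cases hxc : x = c <;> by_cases hyc : y = c <;>
        by_cases hxs : x ∈ seen <;> by_cases hys : y ∈ seen <;>
        simp_all <;> push_cast <;> first | ring | (exact Ne.symm (by assumption))

theorem outerLoop (sit data : String)
    (hnd : (PySem.List.dedup sit.toList).Nodup) :
    ∀ (r p : List Char) (f : Char → Char → Int),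
      (convToMin data).toList = p ++ r →
      ((∀ z ∈ r, z ∈ PySem.List.dedup sit.toList) ∨ (convToMin data).toList.length ≤ 1) →
      (PySem.List.pyRange (p.length : Int) (PySem.Str.len data)).foldl
          (outerStepA data) (mkT (PySem.List.dedup sit.toList) f, p)
        = (mkT (PySem.List.dedup sit.toList)
            (fun x y => f x y + TOT p r x y), p ++ r) := by
  have hlen : (convToMin data).toList.length = data.toList.length := by
    rw [conv_toList]; simp
  intro r
  induction r with
  | nil =>
      intro p f hsplit _
      have h1 : PySem.Str.len data = (p.length : Int) := by
        rw [PySem.Str.len_eq, ← hlen, hsplit]; simp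
      rw [h1, PySem.List.pyRange_one_eq_nil (le_refl _)]
      simp only [List.foldl_nil, List.append_nil]
      refine Prod.ext ?_ rfl
      exact (mkT_congr (fun x _ y _ => by simp [TOT])).symm
  | cons c r ih =>
      intro p f hsplit H
      have hdllen : (convToMin data).toList.length = p.length + 1 + r.length := by
        rw [hsplit]; simp; omega
      have hlt : (p.length : Int) < PySem.Str.len data := by
        rw [PySem.Str.len_eq, ← hlen, hdllen]; push_cast; omega
      rw [PySem.List.pyRange_one_cons hlt, List.foldl_cons]
      have hdch : dchr data (p.length : Int) = c := by
        unfold dchr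
        rw [PySem.List.pyGetD_natCast, hsplit]
        simp [List.getD_eq_getElem?_getD, List.getElem?_append_right]
      have H' : (∀ z ∈ r, z ∈ PySem.List.dedup sit.toList) ∨
          (convToMin data).toList.length ≤ 1 := by
        rcases H with H | H
        · exact Or.inl (fun z hz => H z (List.mem_cons_of_mem _ hz))
        · exact Or.inr H
      by_cases hcp : c ∈ p
      · have hstep : outerStepA data (mkT (PySem.List.dedup sit.toList) f, p) (p.length : Int)
            = (mkT (PySem.List.dedup sit.toList) f, p ++ [c]) := by
          unfold outerStepA
          rw [hdch, if_pos hcp]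
        rw [hstep]
        have hih := ih (p ++ [c]) f (by simpa using hsplit) H'
        rw [show (((p ++ [c]).length : Nat) : Int) = (p.length : Int) + 1 by push_cast; simp] at hih
        rw [hih]
        refine Prod.ext ?_ (by simp)
        exact mkT_congr (fun x _ y _ => by simp [TOT, hcp])
      · have hr' : ∀ z ∈ r, z ∈ PySem.List.dedup sit.toList := by
          rcases H with H | H
          · exact fun z hz => H z (List.mem_cons_of_mem _ hz)
          · intro z hz
            exfalso
            have : 0 < r.length := List.length_pos_of_mem hz
            omega
        have hc' : r ≠ [] → c ∈ PySem.List.dedup sit.toList := by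
          rcases H with H | H
          · exact fun _ => H c (by simp)
          · intro hne
            exfalso
            have : 0 < r.length := List.length_pos_iff.mpr hne
            omega
        have hinner : (PySem.List.pyRange ((p.length : Int) + 1) (PySem.Str.len data)).foldl
            (innerStepA data (p.length : Int)) (mkT (PySem.List.dedup sit.toList) f, ([] : List Char))
            = (mkT (PySem.List.dedup sit.toList)
                (fun x y => f x y + innerCnt c r x y), r) := by
          have hfun : innerStepA data (p.length : Int)
              = fun st j => innerBodyA c (PySem.List.pyGetD (convToMin data).toList j ' ') st := by
            funext st j
            unfold innerStepA
            rw [hdch]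
            rfl
          rw [hfun, PySem.Str.len_eq, ← hlen]
          have hfold := PySem.List.foldl_pyRange_pyGetD' (convToMin data).toList ' '
              (fun st e => innerBodyA c e st)
              (mkT (PySem.List.dedup sit.toList) f, ([] : List Char))
              (a := (p.length : Int) + 1) (by positivity)
          rw [hfold]
          have hdrop : (convToMin data).toList.drop (((p.length : Int) + 1).toNat) = r := by
            rw [hsplit, show ((p.length : Int) + 1).toNat = p.length + 1 by omega,
                show p ++ c :: r = (p ++ [c]) ++ r by simp]
            exact List.drop_left' (by simp)
          rw [hdrop]
          have := innerList c r (PySem.List.dedup sit.toList) f [] hc' hr' hnd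
          simpa using this
        have hstep : outerStepA data (mkT (PySem.List.dedup sit.toList) f, p) (p.length : Int)
            = (mkT (PySem.List.dedup sit.toList)
                (fun x y => f x y + innerCnt c r x y), p ++ [c]) := by
          unfold outerStepA
          rw [hdch, if_neg hcp]
          simp only [hinner]
        rw [hstep]
        have hih := ih (p ++ [c]) (fun x y => f x y + innerCnt c r x y)
            (by simpa using hsplit) H'
        rw [show (((p ++ [c]).length : Nat) : Int) = (p.length : Int) + 1 by push_cast; simp] at hih
        rw [hih]
        refine Prod.ext ?_ (by simp)
        exact mkT_congr (fun x _ y _ => by simp [TOT, hcp]; ring)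

theorem items_mkT (S : List Char) (F : Char → Char → Int) :
    (mkT S F).items = S.map (fun x => (sk x, mkRow S (F x))) := rfl

theorem items_mkRow (S : List Char) (g : Char → Int) :
    (mkRow S g).items = S.map (fun y => (sk y, g y)) := rfl

-- ===== VERDICT (by name: the statement is the Claim_ definition above) =====
theorem oftenTogetherForOne_spec : Claim_equal_oftenTogetherForOne := by
  unfold Claim_equal_oftenTogetherForOne
  intro sit data hdom hpre
  unfold Spec_oftenTogetherForOne
  have hnd : (PySem.List.dedup sit.toList).Nodup := by
    rw [PySem.List.dedup_eq_ofList]; exact PySem.Set.nodup_ofList _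
  have hdomd : ∀ c ∈ data.toList, pvDomChar c = true := by
    unfold Dom_oftenTogetherForOne pvDomStr at hdom
    simp only [Bool.and_eq_true, List.all_eq_true] at hdom
    exact fun c hc => hdom.2 c hc
  have H : (∀ z ∈ (convToMin data).toList, z ∈ PySem.List.dedup sit.toList) ∨
      (convToMin data).toList.length ≤ 1 := by
    rcases hpre with h1 | hall
    · right; rw [conv_toList]; simpa using h1
    · left
      intro z hz
      rw [conv_toList] at hz
      obtain ⟨c, hc, rfl⟩ := List.mem_map.mp hz
      rw [convChar_eq_preLower c (hdomd c hc), PySem.List.dedup_eq_ofList,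
          PySem.Set.mem_ofList]
      simp only [List.all_eq_true] at hall
      simpa using hall c hc
  have houter := outerLoop sit data hnd (convToMin data).toList [] (fun _ _ => 0) rfl H
  rw [show ((([] : List Char).length : Nat) : Int) = 0 by simp] at houter
  have hcell : ∀ x y, (0 : Int) + TOT [] (convToMin data).toList x y
      = cellB (data.toList.map convChar) x y := by
    intro x y
    rw [TOT_closed, ← conv_toList]
    simp [cellB, PySem.List.count_eq]
  simp only [oftenTogetherForOne, oftenTogetherForOne_alt, init_eq, houter, items_mkT,
    List.map_map]
  apply List.map_congr_left
  intro x _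
  simp only [Function.comp, items_mkRow, List.map_map]
  refine congrArg _ ?_
  apply List.map_congr_left
  intro y _
  exact congrArg _ (hcell x y)
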